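-- pv_equiv track=rewrite | github.com/AlvinYuuuu/ATK | AI_Tech_Consultant_Agent/src/tools/diagram_tools.py | _generate_infrastructure_diagram
-- ===== SOURCE A (Python) =====
-- from typing import Dict, List, Any
--
-- def _generate_infrastructure_diagram(components: List[Dict[str, Any]]) -> str:
--     """Generate an infrastructure diagram."""
--     mermaid_code = ["graph TD"]
--
--     # Group components by infrastructure layer
--     layers = {
--         'load_balancer': [],
--         'web_server': [],
--         'application_server': [],
--         'database': [],
--         'storage': [],
--         'external': []
--     }
--
--     for component in components:
--         component_type = component.get('type', 'application_server')
--         if component_type in layers: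
--             layers[component_type].append(component)
--         else:
--             layers['application_server'].append(component)
--
--     # Add components by layer
--     for layer_name, layer_components in layers.items():
--         if layer_components:
--             mermaid_code.append(f"    subgraph {layer_name.replace('_', ' ').title()}")
--             for component in layer_components:
--                 name = component.get('name', 'Component')
--                 description = component.get('description', '')
--                 mermaid_code.append(f"        {name}[{name}<br/>{description}]")
--             mermaid_code.append("    end")
--
--     # Add connections between layers
--     layer_order = ['load_balancer', 'web_server', 'application_server', 'database', 'storage']
--     for i in range(len(layer_order) - 1):
--         current_layer = layer_order[i]
--         next_layer = layer_order[i + 1]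
--         if layers[current_layer] and layers[next_layer]:
--             mermaid_code.append(f"    {layers[current_layer][0]['name']} --> {layers[next_layer][0]['name']}")
--
--     return "\n".join(mermaid_code)
-- ===== SOURCE B (Python) =====
-- from typing import Dict, List, Any
--
-- _LAYERS = ['load_balancer', 'web_server', 'application_server', 'database', 'storage', 'external']
--
--
-- def _layer_of(component: Dict[str, Any]) -> str:
--     t = component.get('type', 'application_server')
--     return t if t in _LAYERS else 'application_server'
--
--
-- def _generate_infrastructure_diagram(components: List[Dict[str, Any]]) -> str:
--     """Generate an infrastructure diagram."""
--     lines = ["graph TD"]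
--
--     # Subgraph per layer, in the fixed layer order; members keep input order.
--     for layer in _LAYERS:
--         members = [c for c in components if _layer_of(c) == layer]
--         if members:
--             lines.append(f"    subgraph {layer.replace('_', ' ').title()}")
--             for c in members:
--                 name = c.get('name', 'Component')
--                 lines.append(f"        {name}[{name}<br/>{c.get('description', '')}]")
--             lines.append("    end")
--
--     # Arrows between consecutive non-empty layers (external excluded).
--     for cur, nxt in zip(_LAYERS, _LAYERS[1:5]):
--         first_cur = next((c for c in components if _layer_of(c) == cur), None)
--         first_nxt = next((c for c in components if _layer_of(c) == nxt), None)
--         if first_cur is not None and first_nxt is not None: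
--             lines.append(f"    {first_cur['name']} --> {first_nxt['name']}")
--
--     return "\n".join(lines)
-- ===== Notes on version B (the rewrite author's own statement) =====
-- stated objective: simpler
-- what changed: B drops A's pre-built dict of six per-layer lists and its index-based connection loop: it iterates the fixed ordered layer list directly, filtering components per layer for the subgraphs and taking the first match per layer for the arrows.
import Mathlib
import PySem

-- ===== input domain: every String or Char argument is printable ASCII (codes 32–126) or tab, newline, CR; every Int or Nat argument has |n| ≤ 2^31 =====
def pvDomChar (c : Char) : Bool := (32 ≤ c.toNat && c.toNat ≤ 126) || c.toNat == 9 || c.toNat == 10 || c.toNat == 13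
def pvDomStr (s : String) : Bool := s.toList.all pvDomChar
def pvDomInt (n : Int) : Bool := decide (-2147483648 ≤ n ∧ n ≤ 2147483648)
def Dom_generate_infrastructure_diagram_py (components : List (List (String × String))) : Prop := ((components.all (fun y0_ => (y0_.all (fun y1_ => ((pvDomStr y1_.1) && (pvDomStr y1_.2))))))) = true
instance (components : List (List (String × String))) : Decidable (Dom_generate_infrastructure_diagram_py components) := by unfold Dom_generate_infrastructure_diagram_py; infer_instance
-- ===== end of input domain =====

-- B drops A's pre-built dict of per-layer lists: it scans `components` per fixed layer
-- (filter for subgraphs, first match for arrows); same return value, different decomposition.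

-- ===== PORT A =====
-- str.title() for ASCII letters (exact on the printable-ASCII domain): a letter is
-- uppercased after a non-letter, lowercased after a letter; other characters unchanged.
def pvTitleAux : Bool → List Char → List Char
  | _, [] => []
  | prev, c :: cs =>
      (if PySem.Chars.isalpha c then
         (if prev then PySem.Chars.lowerChar c else PySem.Chars.upperChar c)
       else c) :: pvTitleAux (PySem.Chars.isalpha c) cs

def pvTitle (s : String) : String := String.ofList (pvTitleAux false s.toList)

-- the literal dict `layers = {...}` with its six empty lists
def pvLayers0 : PySem.Dict String (List (List (String × String))) :=
  PySem.Dict.ofList [("load_balancer", []), ("web_server", []), ("application_server", []),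
                     ("database", []), ("storage", []), ("external", [])]

-- body of `for component in components: ...` (append = modify with list extension)
def pvStepA (d : PySem.Dict String (List (List (String × String))))
    (component : List (String × String)) : PySem.Dict String (List (List (String × String))) :=
  let component_type := (PySem.Dict.mk component).getD "type" "application_server"
  if d.contains component_type then d.modify component_type [] (· ++ [component])
  else d.modify "application_server" [] (· ++ [component])

def generate_infrastructure_diagram_py (components : List (List (String × String))) : String :=
  let mermaid_code0 : List String := ["graph TD"]
  let layers := components.foldl pvStepA pvLayers0
  let mermaid_code1 := layers.items.foldl (fun acc p =>
      if p.2 ≠ [] then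
        (acc ++ ["    subgraph " ++ pvTitle (PySem.Str.replace p.1 "_" " ")]
             ++ p.2.map (fun component =>
                  let name := (PySem.Dict.mk component).getD "name" "Component"
                  let description := (PySem.Dict.mk component).getD "description" ""
                  "        " ++ name ++ "[" ++ name ++ "<br/>" ++ description ++ "]")
             ++ ["    end"])
      else acc) mermaid_code0
  let layer_order : List String := ["load_balancer", "web_server", "application_server", "database", "storage"]
  let mermaid_code2 := (PySem.List.pyRange 0 (layer_order.length - 1) 1).foldl (fun acc i =>
      let current_layer := PySem.List.pyGetD layer_order i ""
      let next_layer := PySem.List.pyGetD layer_order (i + 1) ""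
      let cur := layers.getD current_layer []
      let nxt := layers.getD next_layer []
      if cur ≠ [] ∧ nxt ≠ [] then
        -- `[0]['name']` raises KeyError when 'name' is absent: excluded by Pre_
        acc ++ ["    " ++ ((PySem.Dict.mk (cur.headD [])).get? "name").getD ""
                 ++ " --> " ++ ((PySem.Dict.mk (nxt.headD [])).get? "name").getD ""]
      else acc) mermaid_code1
  PySem.Str.join "\n" mermaid_code2

-- ===== PORT B =====
def pvLayerList : List String :=
  ["load_balancer", "web_server", "application_server", "database", "storage", "external"]

def pvLayerOf (c : List (String × String)) : String :=
  let t := (PySem.Dict.mk c).getD "type" "application_server"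
  if t ∈ pvLayerList then t else "application_server"

def generate_infrastructure_diagram_py_alt (components : List (List (String × String))) : String :=
  let lines0 : List String := ["graph TD"]
  let lines1 := pvLayerList.foldl (fun lines layer =>
      let members := components.filter (fun c => pvLayerOf c == layer)
      if members.isEmpty then lines
      else
        (lines ++ ["    subgraph " ++ pvTitle (PySem.Str.replace layer "_" " ")]
               ++ members.map (fun c =>
                    let name := (PySem.Dict.mk c).getD "name" "Component"
                    "        " ++ name ++ "[" ++ name ++ "<br/>"
                      ++ (PySem.Dict.mk c).getD "description" "" ++ "]")
               ++ ["    end"])) lines0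
  let lines2 := (pvLayerList.zip (PySem.List.slice pvLayerList (some 1) (some 5))).foldl
      (fun lines pr =>
        match components.find? (fun c => pvLayerOf c == pr.1),
              components.find? (fun c => pvLayerOf c == pr.2) with
        -- `['name']` raises KeyError when 'name' is absent: excluded by Pre_
        | some fa, some fb =>
            lines ++ ["    " ++ ((PySem.Dict.mk fa).get? "name").getD ""
                       ++ " --> " ++ ((PySem.Dict.mk fb).get? "name").getD ""]
        | _, _ => lines) lines1
  PySem.Str.join "\n" lines2

-- ===== PRECONDITION & SPEC =====
-- Pre_ excludes exactly the inputs on which the Python raises KeyError: two consecutive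
-- connection layers both non-empty while the first component of one of them has no 'name'.
def Pre_generate_infrastructure_diagram_py (components : List (List (String × String))) : Prop :=
  ∀ pr ∈ [("load_balancer", "web_server"), ("web_server", "application_server"),
          ("application_server", "database"), ("database", "storage")],
    ((components.find? (fun c => pvLayerOf c == pr.1)).isSome
      && (components.find? (fun c => pvLayerOf c == pr.2)).isSome) = true →
    ((components.find? (fun c => pvLayerOf c == pr.1)).all (fun c => (PySem.Dict.mk c).contains "name")
      && (components.find? (fun c => pvLayerOf c == pr.2)).all (fun c => (PySem.Dict.mk c).contains "name")) = true

instance (components : List (List (String × String))) : Decidable (Pre_generate_infrastructure_diagram_py components) := by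
  unfold Pre_generate_infrastructure_diagram_py; infer_instance

def pvWitness_generate_infrastructure_diagram_py : (List (List (String × String))) :=
  [[("type", "load_balancer"), ("name", "LB")], [("type", "web_server"), ("name", "WS")],
   [("name", "App"), ("description", "app box")]]

def Spec_generate_infrastructure_diagram_py (components : List (List (String × String))) (out : String) : Prop := out = generate_infrastructure_diagram_py_alt components
instance (components : List (List (String × String))) (out : String) : Decidable (Spec_generate_infrastructure_diagram_py components out) := by unfold Spec_generate_infrastructure_diagram_py; infer_instance

-- ===== CLAIM (what is proved, stated in full; the proofs are below) =====
def Claim_equal_generate_infrastructure_diagram_py : Prop := ∀ (components : List (List (String × String))), Dom_generate_infrastructure_diagram_py components → Pre_generate_infrastructure_diagram_py components → Spec_generate_infrastructure_diagram_py components (generate_infrastructure_diagram_py components)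

-- ===== LEMMAS AND PROOFS =====

lemma pvGetD_layers0 (k : String) : pvLayers0.getD k [] = [] := by
  have h : pvLayers0 = PySem.Dict.mk [("load_balancer", []), ("web_server", []), ("application_server", []),
                     ("database", []), ("storage", []), ("external", [])] := by decide
  rw [h, PySem.Dict.getD_eq_get?_getD]
  simp only [PySem.Dict.get?_mk_cons]
  split_ifs <;> rfl

lemma pvKeys_layers0 : pvLayers0.keys = pvLayerList := by decide

lemma pvKeys_stepA (d : PySem.Dict String (List (List (String × String))))
    (c : List (String × String)) (hk : d.keys = pvLayerList) : (pvStepA d c).keys = pvLayerList := by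
  unfold pvStepA
  dsimp only
  have happ : d.contains "application_server" = true := by
    rw [PySem.Dict.contains_eq_decide_mem_keys, hk]; decide
  split_ifs with h
  · rw [PySem.Dict.keys_modify, PySem.Dict.keys_insert_of_contains (h := h), hk]
  · rw [PySem.Dict.keys_modify, PySem.Dict.keys_insert_of_contains (h := happ), hk]

lemma pvKeys_foldl (cs : List (List (String × String)))
    (d : PySem.Dict String (List (List (String × String)))) (hk : d.keys = pvLayerList) :
    (cs.foldl pvStepA d).keys = pvLayerList := by
  induction cs generalizing d with
  | nil => exact hk
  | cons c cs ih => exact ih _ (pvKeys_stepA d c hk)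

lemma pvGetD_stepA (d : PySem.Dict String (List (List (String × String))))
    (c : List (String × String)) (hk : d.keys = pvLayerList) (k : String) :
    (pvStepA d c).getD k [] = d.getD k [] ++ (if pvLayerOf c == k then [c] else []) := by
  unfold pvStepA pvLayerOf
  dsimp only
  have hc : ∀ t : String, d.contains t = decide (t ∈ pvLayerList) := by
    intro t; rw [PySem.Dict.contains_eq_decide_mem_keys, hk]
  set t := (PySem.Dict.mk c).getD "type" "application_server" with ht
  by_cases hmem : t ∈ pvLayerList
  · simp only [hc, hmem, decide_true, if_pos]
    rw [PySem.Dict.getD_modify]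
    by_cases hkt : k = t
    · subst hkt; simp
    · simp [hkt, Ne.symm hkt, beq_iff_eq]
  · simp only [hc, hmem, decide_false, Bool.false_eq_true, if_false]
    rw [PySem.Dict.getD_modify]
    by_cases hkt : k = "application_server"
    · subst hkt; simp
    · simp [hkt, Ne.symm hkt, beq_iff_eq]

lemma pvGetD_foldl (cs : List (List (String × String)))
    (d : PySem.Dict String (List (List (String × String)))) (hk : d.keys = pvLayerList)
    (k : String) :
    (cs.foldl pvStepA d).getD k [] = d.getD k [] ++ cs.filter (fun c => pvLayerOf c == k) := by
  induction cs generalizing d with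
  | nil => simp
  | cons c cs ih =>
      rw [List.foldl_cons, ih _ (pvKeys_stepA d c hk), pvGetD_stepA d c hk k, List.filter_cons]
      by_cases h : pvLayerOf c == k <;> simp [h]

lemma pvItems_foldl (cs : List (List (String × String))) :
    (cs.foldl pvStepA pvLayers0).items
      = pvLayerList.map (fun k => (k, cs.filter (fun c => pvLayerOf c == k))) := by
  have hk := pvKeys_foldl cs pvLayers0 pvKeys_layers0
  have hnd : (cs.foldl pvStepA pvLayers0).keys.Nodup := by rw [hk]; decide
  rw [PySem.Dict.items_eq_map_keys _ hnd [], hk]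
  exact List.map_congr_left (fun k _ => by
    rw [pvGetD_foldl cs pvLayers0 pvKeys_layers0 k, pvGetD_layers0, List.nil_append])

lemma pvFind_eq {α : Type} (p : α → Bool) (l : List α) : l.find? p = (l.filter p).head? := by
  induction l with
  | nil => rfl
  | cons a l ih =>
      rw [List.find?_cons, List.filter_cons]
      cases h : p a
      · simp
      · simp

lemma pvEmit (acc : List String) (k : String) (m : List (List (String × String))) :
    (if m ≠ [] then
       acc ++ ["    subgraph " ++ pvTitle (PySem.Str.replace k "_" " ")]
           ++ m.map (fun component =>
                let name := (PySem.Dict.mk component).getD "name" "Component"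
                let description := (PySem.Dict.mk component).getD "description" ""
                "        " ++ name ++ "[" ++ name ++ "<br/>" ++ description ++ "]")
           ++ ["    end"]
     else acc)
    = (if m.isEmpty then acc
       else
         acc ++ ["    subgraph " ++ pvTitle (PySem.Str.replace k "_" " ")]
             ++ m.map (fun c =>
                  let name := (PySem.Dict.mk c).getD "name" "Component"
                  "        " ++ name ++ "[" ++ name ++ "<br/>"
                    ++ (PySem.Dict.mk c).getD "description" "" ++ "]")
             ++ ["    end"]) := by
  cases m <;> simp

lemma pvArrow (acc : List String) (f1 f2 : List (List (String × String))) :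
    (if f1 ≠ [] ∧ f2 ≠ [] then
       acc ++ ["    " ++ ((PySem.Dict.mk (f1.headD [])).get? "name").getD ""
                ++ " --> " ++ ((PySem.Dict.mk (f2.headD [])).get? "name").getD ""]
     else acc)
    = (match f1.head?, f2.head? with
       | some fa, some fb =>
           acc ++ ["    " ++ ((PySem.Dict.mk fa).get? "name").getD ""
                    ++ " --> " ++ ((PySem.Dict.mk fb).get? "name").getD ""]
       | _, _ => acc) := by
  cases f1 <;> cases f2 <;> simp

theorem generate_infrastructure_diagram_py_spec : Claim_equal_generate_infrastructure_diagram_py := by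
  unfold Claim_equal_generate_infrastructure_diagram_py
  intro components _ _
  unfold Spec_generate_infrastructure_diagram_py
  unfold generate_infrastructure_diagram_py generate_infrastructure_diagram_py_alt
  dsimp only
  rw [pvItems_foldl, List.foldl_map]
  dsimp only
  simp only [pvEmit]
  have hz : pvLayerList.zip (PySem.List.slice pvLayerList (some 1) (some 5))
      = [("load_balancer", "web_server"), ("web_server", "application_server"),
         ("application_server", "database"), ("database", "storage")] := by decide
  have hr : PySem.List.pyRange 0 (((["load_balancer", "web_server", "application_server",
      "database", "storage"] : List String).length : Int) - 1) 1 = [0, 1, 2, 3] := by decide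
  rw [hz, hr]
  simp only [List.foldl_cons, List.foldl_nil]
  have g0 : PySem.List.pyGetD (["load_balancer", "web_server", "application_server", "database",
      "storage"] : List String) (0 : Int) "" = "load_balancer" := by decide
  have g0' : PySem.List.pyGetD (["load_balancer", "web_server", "application_server", "database",
      "storage"] : List String) ((0 : Int) + 1) "" = "web_server" := by decide
  have g1 : PySem.List.pyGetD (["load_balancer", "web_server", "application_server", "database",
      "storage"] : List String) (1 : Int) "" = "web_server" := by decide
  have g1' : PySem.List.pyGetD (["load_balancer", "web_server", "application_server", "database",
      "storage"] : List String) ((1 : Int) + 1) "" = "application_server" := by decide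
  have g2 : PySem.List.pyGetD (["load_balancer", "web_server", "application_server", "database",
      "storage"] : List String) (2 : Int) "" = "application_server" := by decide
  have g2' : PySem.List.pyGetD (["load_balancer", "web_server", "application_server", "database",
      "storage"] : List String) ((2 : Int) + 1) "" = "database" := by decide
  have g3 : PySem.List.pyGetD (["load_balancer", "web_server", "application_server", "database",
      "storage"] : List String) (3 : Int) "" = "database" := by decide
  have g3' : PySem.List.pyGetD (["load_balancer", "web_server", "application_server", "database",
      "storage"] : List String) ((3 : Int) + 1) "" = "storage" := by decide
  simp only [g0, g0', g1, g1', g2, g2', g3, g3']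
  simp only [pvGetD_foldl _ _ pvKeys_layers0, pvGetD_layers0, List.nil_append, pvFind_eq, pvArrow]

-- ===== VERDICT: see theorem above =====
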